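-- pv_equiv track=rewrite | github.com/pypi-data/pypi-mirror-402 | packages/aisentry/aisentry-1.0.0-py3-none-any.whl/aisentry/scorers/hallucination_scorer.py | _score_user_feedback
-- ===== SOURCE A (Python) =====
-- from typing import Any, Dict, List
--
-- def _score_user_feedback(parsed_data: Dict[str, Any]) -> int:
--     """
--     Score user feedback and correction mechanisms (0-100) - Evidence-Based
--
--     Uses AST-based function detection for feedback systems.
--     User feedback helps identify and correct hallucinations.
--
--     Scoring based on feedback mechanisms:
--     - Feedback + Review + Correction: 100
--     - Feedback + Review: 75
--     - Feedback only: 50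
--     - None detected: 0
--     """
--     # User feedback is primarily about feedback collection functions
--     functions = parsed_data.get('functions', [])
--     function_names = [f['name'].lower() for f in functions]
--
--     # Feedback collection functions
--     feedback_patterns = [
--         'collect_feedback', 'submit_feedback', 'user_feedback',
--         'report_issue', 'flag_response'
--     ]
--     has_feedback = any(
--         any(pattern in func for pattern in feedback_patterns)
--         for func in function_names
--     )
--
--     # Human review functions
--     review_patterns = [
--         'human_review', 'manual_review', 'reviewer_queue',
--         'require_review', 'escalate_review'
--     ]
--     has_review = any(
--         any(pattern in func for pattern in review_patterns)
--         for func in function_names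
--     )
--
--     # Correction mechanism functions
--     correction_patterns = [
--         'correct_response', 'update_response', 'fix_hallucination',
--         'override_response', 'edit_output'
--     ]
--     has_correction = any(
--         any(pattern in func for pattern in correction_patterns)
--         for func in function_names
--     )
--
--     # Scoring logic
--     if has_feedback and has_review and has_correction:
--         return 100
--     elif has_feedback and has_review:
--         return 75
--     elif has_feedback:
--         return 50
--     else:
--         return 0
-- ===== SOURCE B (Python) =====
-- # Single pattern->bit table folded into one integer bitmask, then a mask->score lookup table.
-- _PATTERN_BITS = [
--     ('collect_feedback', 1), ('submit_feedback', 1), ('user_feedback', 1),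
--     ('report_issue', 1), ('flag_response', 1),
--     ('human_review', 2), ('manual_review', 2), ('reviewer_queue', 2),
--     ('require_review', 2), ('escalate_review', 2),
--     ('correct_response', 4), ('update_response', 4), ('fix_hallucination', 4),
--     ('override_response', 4), ('edit_output', 4),
-- ]
--
-- _SCORES = {1: 50, 3: 75, 5: 50, 7: 100}
--
--
-- def _score_user_feedback(parsed_data):
--     mask = 0
--     for f in parsed_data.get('functions', []):
--         name = f['name'].lower()
--         for pattern, bit in _PATTERN_BITS:
--             if pattern in name:
--                 mask |= bit
--     return _SCORES.get(mask, 0)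
-- ===== Notes on version B (the rewrite author's own statement) =====
-- stated objective: alternative
-- what changed: Replaces the three separate per-category any()-scans and the boolean and-cascade with one pattern-to-bit table folded into a single integer bitmask over one nested loop, scored by a mask-to-score lookup table.
import Mathlib
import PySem

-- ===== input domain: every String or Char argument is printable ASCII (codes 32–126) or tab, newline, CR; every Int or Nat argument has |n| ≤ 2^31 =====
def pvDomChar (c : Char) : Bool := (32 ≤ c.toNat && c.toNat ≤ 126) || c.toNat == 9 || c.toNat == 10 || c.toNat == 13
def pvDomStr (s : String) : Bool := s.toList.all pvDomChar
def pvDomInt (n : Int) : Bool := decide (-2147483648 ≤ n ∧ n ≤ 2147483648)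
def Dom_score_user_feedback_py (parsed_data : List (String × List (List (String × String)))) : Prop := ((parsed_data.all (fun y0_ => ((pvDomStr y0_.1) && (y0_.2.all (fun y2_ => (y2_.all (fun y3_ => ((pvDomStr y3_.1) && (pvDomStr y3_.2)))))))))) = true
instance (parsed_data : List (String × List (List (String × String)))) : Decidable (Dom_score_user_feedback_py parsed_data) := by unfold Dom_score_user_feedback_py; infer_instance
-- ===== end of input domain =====

-- B replaces A's three per-category any()-scans and boolean cascade with a single
-- pattern→bit table folded into one integer bitmask and a mask→score lookup table (alternative decomposition, same cost).


-- ===== PORT A =====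
def pvFeedbackPatterns : List String :=
  ["collect_feedback", "submit_feedback", "user_feedback", "report_issue", "flag_response"]
def pvReviewPatterns : List String :=
  ["human_review", "manual_review", "reviewer_queue", "require_review", "escalate_review"]
def pvCorrectionPatterns : List String :=
  ["correct_response", "update_response", "fix_hallucination", "override_response", "edit_output"]

-- f['name'] raises KeyError when 'name' is missing; Pre_ excludes that, so getD "" is exact on Pre_.
def score_user_feedback_py (parsed_data : List (String × List (List (String × String)))) : Int :=
  let functions := (PySem.Dict.mk parsed_data).getD "functions" []
  let function_names := functions.map (fun f => PySem.Str.lower ((PySem.Dict.mk f).getD "name" ""))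
  let has_feedback := function_names.any (fun func => pvFeedbackPatterns.any (fun p => PySem.Str.isIn p func))
  let has_review := function_names.any (fun func => pvReviewPatterns.any (fun p => PySem.Str.isIn p func))
  let has_correction := function_names.any (fun func => pvCorrectionPatterns.any (fun p => PySem.Str.isIn p func))
  if has_feedback && has_review && has_correction then 100
  else if has_feedback && has_review then 75
  else if has_feedback then 50
  else 0

-- ===== PORT B =====
def pvPatternBits : List (String × Int) :=
  [("collect_feedback", 1), ("submit_feedback", 1), ("user_feedback", 1),
   ("report_issue", 1), ("flag_response", 1),
   ("human_review", 2), ("manual_review", 2), ("reviewer_queue", 2),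
   ("require_review", 2), ("escalate_review", 2),
   ("correct_response", 4), ("update_response", 4), ("fix_hallucination", 4),
   ("override_response", 4), ("edit_output", 4)]

def pvScores : PySem.Dict Int Int := PySem.Dict.mk [(1, 50), (3, 75), (5, 50), (7, 100)]

def score_user_feedback_py_alt (parsed_data : List (String × List (List (String × String)))) : Int :=
  let mask := ((PySem.Dict.mk parsed_data).getD "functions" []).foldl
    (fun (mask : Int) f =>
      let name := PySem.Str.lower ((PySem.Dict.mk f).getD "name" "")
      pvPatternBits.foldl (fun m pb => if PySem.Str.isIn pb.1 name then PySem.Int.bor m pb.2 else m) mask)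
    0
  pvScores.getD mask 0

-- ===== PRECONDITION & SPEC =====
-- A raises KeyError on any function dict without a 'name' key; Pre_ requires every function dict to carry one.
def Pre_score_user_feedback_py (parsed_data : List (String × List (List (String × String)))) : Prop :=
  ∀ f ∈ (PySem.Dict.mk parsed_data).getD "functions" [], (PySem.Dict.mk f).contains "name" = true
instance (parsed_data : List (String × List (List (String × String)))) : Decidable (Pre_score_user_feedback_py parsed_data) := by unfold Pre_score_user_feedback_py; infer_instance
def pvWitness_score_user_feedback_py : (List (String × List (List (String × String)))) :=
  [("functions", [[("name", "collect_feedback")]])]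
def Spec_score_user_feedback_py (parsed_data : List (String × List (List (String × String)))) (out : Int) : Prop := out = score_user_feedback_py_alt parsed_data
instance (parsed_data : List (String × List (List (String × String)))) (out : Int) : Decidable (Spec_score_user_feedback_py parsed_data out) := by unfold Spec_score_user_feedback_py; infer_instance

-- ===== CLAIM (what is proved, stated in full; the proofs are below) =====
def Claim_equal_score_user_feedback_py : Prop := ∀ (parsed_data : List (String × List (List (String × String)))), Dom_score_user_feedback_py parsed_data → Pre_score_user_feedback_py parsed_data → Spec_score_user_feedback_py parsed_data (score_user_feedback_py parsed_data)

-- ===== LEMMAS AND PROOFS =====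

theorem pv_bor_nonneg (a b : Int) (ha : 0 ≤ a) (hb : 0 ≤ b) : 0 ≤ PySem.Int.bor a b := by
  rw [PySem.Int.bor_of_nonneg ha hb]; exact Int.natCast_nonneg _

theorem pv_bor_self (b : Int) (hb : 0 ≤ b) : PySem.Int.bor b b = b := by
  rw [PySem.Int.bor_of_nonneg hb hb, Nat.or_self, Int.toNat_of_nonneg hb]

theorem pv_bor_zero_left (b : Int) : PySem.Int.bor 0 b = b := by
  rw [PySem.Int.bor_comm, PySem.Int.bor_zero]

theorem pv_bor_assoc (a b c : Int) (ha : 0 ≤ a) (hb : 0 ≤ b) (hc : 0 ≤ c) :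
    PySem.Int.bor (PySem.Int.bor a b) c = PySem.Int.bor a (PySem.Int.bor b c) := by
  rw [PySem.Int.bor_of_nonneg ha hb, PySem.Int.bor_of_nonneg hb hc,
    PySem.Int.bor_of_nonneg (Int.natCast_nonneg _) hc,
    PySem.Int.bor_of_nonneg ha (Int.natCast_nonneg _),
    Int.toNat_natCast, Int.toNat_natCast, Nat.or_assoc]

-- the accumulator of B's inner fold stays nonnegative
theorem pv_fold_nonneg (name : String) (pats : List (String × Int)) (m : Int)
    (hm : 0 ≤ m) (hp : ∀ pb ∈ pats, 0 ≤ pb.2) :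
    0 ≤ pats.foldl (fun m pb => if PySem.Str.isIn pb.1 name then PySem.Int.bor m pb.2 else m) m := by
  induction pats generalizing m with
  | nil => exact hm
  | cons p ps ih =>
    simp only [List.foldl_cons]
    refine ih _ ?_ (fun pb h => hp pb (List.mem_cons_of_mem _ h))
    split
    · exact pv_bor_nonneg _ _ hm (hp p (List.mem_cons_self ..))
    · exact hm

-- B's inner fold factors: its start value is just or-ed onto the fold from 0
theorem pv_fold_factor (name : String) (pats : List (String × Int)) (m : Int)
    (hm : 0 ≤ m) (hp : ∀ pb ∈ pats, 0 ≤ pb.2) :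
    pats.foldl (fun m pb => if PySem.Str.isIn pb.1 name then PySem.Int.bor m pb.2 else m) m
      = PySem.Int.bor m (pats.foldl (fun m pb => if PySem.Str.isIn pb.1 name then PySem.Int.bor m pb.2 else m) 0) := by
  induction pats generalizing m with
  | nil => simp [PySem.Int.bor_zero]
  | cons p ps ih =>
    have hps : ∀ pb ∈ ps, 0 ≤ pb.2 := fun pb h => hp pb (List.mem_cons_of_mem _ h)
    have hb : 0 ≤ p.2 := hp p (List.mem_cons_self ..)
    simp only [List.foldl_cons]
    by_cases c : PySem.Str.isIn p.1 name
    · simp only [c, if_true, pv_bor_zero_left]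
      rw [ih _ (pv_bor_nonneg _ _ hm hb) hps, ih _ hb hps,
        pv_bor_assoc _ _ _ hm hb (pv_fold_nonneg name ps 0 le_rfl hps)]
    · simp only [c]
      exact ih _ hm hps

-- a group of patterns sharing one bit folds to that bit iff any pattern matches
theorem pv_group (name : String) (pats : List String) (b : Int) (hb : 0 ≤ b) :
    (pats.map (fun p => (p, b))).foldl
        (fun m pb => if PySem.Str.isIn pb.1 name then PySem.Int.bor m pb.2 else m) 0
      = if pats.any (fun p => PySem.Str.isIn p name) then b else 0 := by
  induction pats with
  | nil => simp
  | cons p ps ih =>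
    have hps : ∀ pb ∈ ps.map (fun p => (p, b)), 0 ≤ pb.2 := by
      intro pb h; rcases List.mem_map.1 h with ⟨q, _, rfl⟩; exact hb
    simp only [List.map_cons, List.foldl_cons, List.any_cons]
    by_cases c : PySem.Str.isIn p name
    · simp only [c, if_true, Bool.true_or, pv_bor_zero_left]
      rw [pv_fold_factor name _ b hb hps, ih]
      by_cases a : ps.any (fun p => PySem.Str.isIn p name)
      · rw [if_pos a]; exact pv_bor_self b hb
      · rw [if_neg a]; exact PySem.Int.bor_zero b
    · simp only [c, Bool.false_or]
      exact ih

-- the three flags packed into one mask value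
def pvMval (a b c : Bool) : Int :=
  PySem.Int.bor (PySem.Int.bor (if a then 1 else 0) (if b then 2 else 0)) (if c then 4 else 0)

theorem pv_mval_nonneg : ∀ a b c : Bool, 0 ≤ pvMval a b c := by decide

theorem pv_mval_bor : ∀ a b c d e f : Bool,
    PySem.Int.bor (pvMval a b c) (pvMval d e f) = pvMval (a || d) (b || e) (c || f) := by decide

theorem pv_bits_nonneg : ∀ pb ∈ pvPatternBits, (0:Int) ≤ pb.2 := by decide

-- one function name's contribution to the mask, in terms of A's three pattern scans
theorem pv_inner (name : String) :
    pvPatternBits.foldl (fun m pb => if PySem.Str.isIn pb.1 name then PySem.Int.bor m pb.2 else m) 0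
      = pvMval (pvFeedbackPatterns.any (fun p => PySem.Str.isIn p name))
               (pvReviewPatterns.any (fun p => PySem.Str.isIn p name))
               (pvCorrectionPatterns.any (fun p => PySem.Str.isIn p name)) := by
  have hsplit : pvPatternBits
      = (pvFeedbackPatterns.map (fun p => (p, (1:Int))))
        ++ ((pvReviewPatterns.map (fun p => (p, (2:Int))))
        ++ (pvCorrectionPatterns.map (fun p => (p, (4:Int))))) := by rfl
  have h2 : ∀ pb ∈ pvReviewPatterns.map (fun p => (p, (2:Int))), (0:Int) ≤ pb.2 := by decide
  have h4 : ∀ pb ∈ pvCorrectionPatterns.map (fun p => (p, (4:Int))), (0:Int) ≤ pb.2 := by decide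
  rw [hsplit, List.foldl_append, List.foldl_append,
    pv_group name pvFeedbackPatterns 1 (by norm_num)]
  rw [pv_fold_factor name _ _ (by split <;> norm_num) h2, pv_group name pvReviewPatterns 2 (by norm_num)]
  rw [pv_fold_factor name _ _ (pv_bor_nonneg _ _ (by split <;> norm_num) (by split <;> norm_num)) h4,
    pv_group name pvCorrectionPatterns 4 (by norm_num)]
  rfl

-- B's outer fold over the functions computes the bitmask of A's three flags
theorem pv_outer (fs : List (List (String × String))) (m : Int) (hm : 0 ≤ m) :
    fs.foldl (fun (mask : Int) f =>
        let name := PySem.Str.lower ((PySem.Dict.mk f).getD "name" "")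
        pvPatternBits.foldl (fun m pb => if PySem.Str.isIn pb.1 name then PySem.Int.bor m pb.2 else m) mask) m
      = PySem.Int.bor m
          (pvMval ((fs.map (fun f => PySem.Str.lower ((PySem.Dict.mk f).getD "name" ""))).any
                      (fun func => pvFeedbackPatterns.any (fun p => PySem.Str.isIn p func)))
                  ((fs.map (fun f => PySem.Str.lower ((PySem.Dict.mk f).getD "name" ""))).any
                      (fun func => pvReviewPatterns.any (fun p => PySem.Str.isIn p func)))
                  ((fs.map (fun f => PySem.Str.lower ((PySem.Dict.mk f).getD "name" ""))).any
                      (fun func => pvCorrectionPatterns.any (fun p => PySem.Str.isIn p func)))) := by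
  induction fs generalizing m with
  | nil => simp [pvMval, PySem.Int.bor_zero]
  | cons f fs ih =>
    simp only [List.foldl_cons, List.map_cons, List.any_cons]
    rw [pv_fold_factor _ _ _ hm pv_bits_nonneg, pv_inner,
      ih _ (pv_bor_nonneg _ _ hm (pv_mval_nonneg _ _ _)),
      pv_bor_assoc _ _ _ hm (pv_mval_nonneg _ _ _) (pv_mval_nonneg _ _ _), pv_mval_bor]

-- ===== VERDICT (by name: the statement is the Claim_ definition above) =====
theorem score_user_feedback_py_spec : Claim_equal_score_user_feedback_py := by
  intro parsed_data _ _
  unfold Spec_score_user_feedback_py score_user_feedback_py score_user_feedback_py_alt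
  simp only [pv_outer _ 0 le_rfl, pv_bor_zero_left]
  generalize (((PySem.Dict.mk parsed_data).getD "functions" []).map
      (fun f => PySem.Str.lower ((PySem.Dict.mk f).getD "name" ""))).any
      (fun func => pvFeedbackPatterns.any (fun p => PySem.Str.isIn p func)) = h1
  generalize (((PySem.Dict.mk parsed_data).getD "functions" []).map
      (fun f => PySem.Str.lower ((PySem.Dict.mk f).getD "name" ""))).any
      (fun func => pvReviewPatterns.any (fun p => PySem.Str.isIn p func)) = h2
  generalize (((PySem.Dict.mk parsed_data).getD "functions" []).map
      (fun f => PySem.Str.lower ((PySem.Dict.mk f).getD "name" ""))).any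
      (fun func => pvCorrectionPatterns.any (fun p => PySem.Str.isIn p func)) = h3
  cases h1 <;> cases h2 <;> cases h3 <;> decide
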